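-- pv_equiv track=rewrite | github.com/cutecryptid/minish-hat | helper/octal_adj.py | build_mask
-- ===== SOURCE A (Python) =====
-- def build_mask(a, b, or_ret, and_ret):
--     mask = 0
--     comp_mask = 0
--     pos = 0
--     while a or b or and_ret:
--         ret = 0
--         if (and_ret & 7 == 0) and ((or_ret & 7) in (3,6)):
--             ret = 7
--         elif (and_ret & 7 == 2) and a&7 != b&7 and a&7 in (3,6) and b&7 in (3,6):
--             ret = 7
--         mask += ret * (8 ** pos)
--         comp_mask += (7-ret) * (8 ** pos)
--         pos += 1
--         and_ret >>= 3
--         or_ret >>= 3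
--         a >>= 3
--         b >>= 3
--     return (mask,comp_mask)
-- ===== SOURCE B (Python) =====
-- def build_mask(a, b, or_ret, and_ret):
--     # Recursive, most-significant-first: recurse on the high digits, then append
--     # this position's digit. The per-digit test uses a bitmask table (72 = bits
--     # 3 and 6 set) and the product identity x*y == 18 <=> {x, y} == {3, 6}.
--     if not (a or b or and_ret):
--         return (0, 0)
--     hi_mask, hi_comp = build_mask(a >> 3, b >> 3, or_ret >> 3, and_ret >> 3)
--     s = and_ret & 7
--     if (s == 0 and (72 >> (or_ret & 7)) & 1) or (s == 2 and (a & 7) * (b & 7) == 18):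
--         d = 7
--     else:
--         d = 0
--     return (hi_mask * 8 + d, hi_comp * 8 + 7 - d)
-- ===== Notes on version B (the rewrite author's own statement) =====
-- stated objective: alternative
-- what changed: B replaces A's accumulating while loop (running power 8**pos and two separate digit sums) by a most-significant-first recursion that Horner-builds both results on the way back up, and it decides each digit by a bit-table test ((72>>o)&1) and the product identity x*y==18 instead of A's chained membership comparisons.
import Mathlib
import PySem

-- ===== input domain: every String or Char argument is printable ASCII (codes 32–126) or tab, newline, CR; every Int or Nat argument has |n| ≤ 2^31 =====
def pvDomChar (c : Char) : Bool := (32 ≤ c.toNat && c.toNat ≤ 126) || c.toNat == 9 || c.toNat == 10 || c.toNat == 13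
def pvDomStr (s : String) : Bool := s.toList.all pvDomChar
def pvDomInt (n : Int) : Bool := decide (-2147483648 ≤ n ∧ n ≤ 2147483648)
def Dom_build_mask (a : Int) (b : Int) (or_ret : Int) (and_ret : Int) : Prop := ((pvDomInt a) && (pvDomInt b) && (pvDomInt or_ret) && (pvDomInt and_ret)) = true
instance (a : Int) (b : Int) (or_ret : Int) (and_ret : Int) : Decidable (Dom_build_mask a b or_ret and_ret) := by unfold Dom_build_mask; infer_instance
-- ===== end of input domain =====

-- B is recursive most-significant-first (Horner on the way back up) and decides each
-- digit by a bit-table test and a product identity; both ports share one fuel bound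
-- (in Python both A and B fail to terminate when a, b or and_ret is negative).

-- ===== PORT A =====
-- Python '&7' is PySem.Int.band · 7, '>>3' is Int '>>> 3' (exact on negatives too); the
-- while loop is fuel recursion — on Pre_ the fuel bound is never exhausted, and both ports
-- use the same fuel so the equivalence holds for every input.
def buildMaskLoopA (fuel : Nat) (a b or_ret and_ret mask comp_mask : Int) (pos : Nat) : Int × Int :=
  match fuel with
  | 0 => (mask, comp_mask)
  | f + 1 =>
    if a ≠ 0 ∨ b ≠ 0 ∨ and_ret ≠ 0 then
      let ret : Int :=
        if PySem.Int.band and_ret 7 = 0 ∧ (PySem.Int.band or_ret 7 = 3 ∨ PySem.Int.band or_ret 7 = 6) then 7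
        else if PySem.Int.band and_ret 7 = 2 ∧ PySem.Int.band a 7 ≠ PySem.Int.band b 7 ∧
                (PySem.Int.band a 7 = 3 ∨ PySem.Int.band a 7 = 6) ∧
                (PySem.Int.band b 7 = 3 ∨ PySem.Int.band b 7 = 6) then 7
        else 0
      buildMaskLoopA f (a >>> 3) (b >>> 3) (or_ret >>> 3) (and_ret >>> 3)
        (mask + ret * 8 ^ pos) (comp_mask + (7 - ret) * 8 ^ pos) (pos + 1)
    else (mask, comp_mask)

def build_mask (a : Int) (b : Int) (or_ret : Int) (and_ret : Int) : Int × Int :=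
  buildMaskLoopA (a.natAbs + b.natAbs + and_ret.natAbs + 1) a b or_ret and_ret 0 0 0

-- ===== PORT B =====
-- Source B's recursion, with the same fuel bound as port A (Python recurses directly; on Pre_
-- the fuel is never exhausted). '(72 >> (or_ret & 7)) & 1' is truthy iff it equals 1;
-- '.toNat' on the shift amount is exact because 'band or_ret 7' is never negative.
def buildMaskRecB (fuel : Nat) (a b or_ret and_ret : Int) : Int × Int :=
  match fuel with
  | 0 => (0, 0)
  | f + 1 =>
    if a ≠ 0 ∨ b ≠ 0 ∨ and_ret ≠ 0 then
      let hi := buildMaskRecB f (a >>> 3) (b >>> 3) (or_ret >>> 3) (and_ret >>> 3)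
      let s := PySem.Int.band and_ret 7
      let d : Int :=
        if (s = 0 ∧ PySem.Int.band ((72 : Int) >>> (PySem.Int.band or_ret 7).toNat) 1 = 1) ∨
           (s = 2 ∧ PySem.Int.band a 7 * PySem.Int.band b 7 = 18) then 7 else 0
      (hi.1 * 8 + d, hi.2 * 8 + 7 - d)
    else (0, 0)

def build_mask_alt (a : Int) (b : Int) (or_ret : Int) (and_ret : Int) : Int × Int :=
  buildMaskRecB (a.natAbs + b.natAbs + and_ret.natAbs + 1) a b or_ret and_ret

-- ===== PRECONDITION & SPEC =====
-- No Pre_: both ports use the same fuel bound, so the equivalence is total.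
def Spec_build_mask (a : Int) (b : Int) (or_ret : Int) (and_ret : Int) (out : Int × Int) : Prop := out = build_mask_alt a b or_ret and_ret
instance (a : Int) (b : Int) (or_ret : Int) (and_ret : Int) (out : Int × Int) : Decidable (Spec_build_mask a b or_ret and_ret out) := by unfold Spec_build_mask; infer_instance

-- ===== CLAIM (what is proved, stated in full; the proofs are below) =====
def Claim_equal_build_mask : Prop := ∀ (a : Int) (b : Int) (or_ret : Int) (and_ret : Int), Dom_build_mask a b or_ret and_ret → Spec_build_mask a b or_ret and_ret (build_mask a b or_ret and_ret)

-- ===== LEMMAS AND PROOFS =====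

theorem band7_bounds (x : Int) : 0 ≤ PySem.Int.band x 7 ∧ PySem.Int.band x 7 ≤ 7 := by
  unfold PySem.Int.band
  split_ifs with h1 h2 h3
  · have := Nat.and_le_right (n := x.toNat) (m := (7 : Int).toNat)
    have h7 : (7 : Int).toNat = 7 := rfl
    omega
  · omega
  · have h7 : (7 : Int).toNat = 7 := rfl
    omega
  · omega

/-- The bit-table test: '(72 >> o) & 1 == 1' reads membership of o in {3, 6}. -/
theorem table_test (o : Int) (h0 : 0 ≤ o) (h7 : o ≤ 7) :
    (PySem.Int.band ((72 : Int) >>> o.toNat) 1 = 1) ↔ (o = 3 ∨ o = 6) := by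
  interval_cases o <;> decide

/-- The product identity: for octal digits, x*y = 18 exactly when {x, y} = {3, 6}. -/
theorem prod_test (x y : Int) (hx0 : 0 ≤ x) (hx7 : x ≤ 7) (hy0 : 0 ≤ y) (hy7 : y ≤ 7) :
    (x * y = 18) ↔ (x ≠ y ∧ (x = 3 ∨ x = 6) ∧ (y = 3 ∨ y = 6)) := by
  interval_cases x <;> interval_cases y <;> omega

/-- A's nested-if digit decision equals B's flat OR decision. -/
theorem ret_eq_d (a b o n : Int) :
    (if PySem.Int.band n 7 = 0 ∧ (PySem.Int.band o 7 = 3 ∨ PySem.Int.band o 7 = 6) then (7 : Int)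
     else if PySem.Int.band n 7 = 2 ∧ PySem.Int.band a 7 ≠ PySem.Int.band b 7 ∧
             (PySem.Int.band a 7 = 3 ∨ PySem.Int.band a 7 = 6) ∧
             (PySem.Int.band b 7 = 3 ∨ PySem.Int.band b 7 = 6) then 7
     else 0) =
    (if (PySem.Int.band n 7 = 0 ∧ PySem.Int.band ((72 : Int) >>> (PySem.Int.band o 7).toNat) 1 = 1) ∨
        (PySem.Int.band n 7 = 2 ∧ PySem.Int.band a 7 * PySem.Int.band b 7 = 18) then (7 : Int) else 0) := by
  obtain ⟨ho0, ho7⟩ := band7_bounds o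
  obtain ⟨ha0, ha7⟩ := band7_bounds a
  obtain ⟨hb0, hb7⟩ := band7_bounds b
  have ht := table_test _ ho0 ho7
  have hp := prod_test _ _ ha0 ha7 hb0 hb7
  by_cases h1 : PySem.Int.band n 7 = 0 ∧ (PySem.Int.band o 7 = 3 ∨ PySem.Int.band o 7 = 6)
  · rw [if_pos h1, if_pos (Or.inl ⟨h1.1, ht.mpr h1.2⟩)]
  · by_cases h2 : PySem.Int.band n 7 = 2 ∧ PySem.Int.band a 7 ≠ PySem.Int.band b 7 ∧
        (PySem.Int.band a 7 = 3 ∨ PySem.Int.band a 7 = 6) ∧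
        (PySem.Int.band b 7 = 3 ∨ PySem.Int.band b 7 = 6)
    · rw [if_neg h1, if_pos h2, if_pos (Or.inr ⟨h2.1, hp.mpr h2.2⟩)]
    · rw [if_neg h1, if_neg h2, if_neg]
      rintro (⟨hz, hto⟩ | ⟨hs, hpr⟩)
      · exact h1 ⟨hz, ht.mp hto⟩
      · exact h2 ⟨hs, hp.mp hpr⟩

/-- A's accumulating loop equals B's recursion, position-shifted into the accumulators. -/
theorem loopA_eq_recB (fuel : Nat) :
    ∀ (a b o n mask comp : Int) (pos : Nat),
      buildMaskLoopA fuel a b o n mask comp pos =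
        (mask + (buildMaskRecB fuel a b o n).1 * 8 ^ pos,
         comp + (buildMaskRecB fuel a b o n).2 * 8 ^ pos) := by
  induction fuel with
  | zero => intro a b o n mask comp pos; simp [buildMaskLoopA, buildMaskRecB]
  | succ f ih =>
    intro a b o n mask comp pos
    simp only [buildMaskLoopA, buildMaskRecB]
    split
    · rw [ih, ret_eq_d a b o n]
      simp only [Prod.mk.injEq, pow_succ]
      constructor <;> ring
    · simp

-- ===== VERDICT (by name: the statement is the Claim_ definition above) =====
theorem build_mask_spec : Claim_equal_build_mask := by
  intro a b o n _
  unfold Spec_build_mask build_mask build_mask_alt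
  rw [loopA_eq_recB]
  simp
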